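-- pv_equiv track=rewrite | github.com/kad-ecoli/python_scripts | contact_pdb.py | calc_contact_num
-- ===== SOURCE A (Python) =====
-- short_range_def=6 # short_range_def <= separation < medm_range_def
--
-- medm_range_def=12 # medm_range_def  <= separation < long_range_def
--
-- long_range_def=24 # long_range_def  <= separation. 25 in NeBcon/NN-BAYES
--
-- def calc_contact_num(res_con_list,L):
--     ''' calculate the number of contacts at different range '''
--     con_num_dict={"short":0,"medm":0,"long":0,"all":len(res_con_list),"L":L}
--     for resi1,resi2,dist in res_con_list:
--         con_num_dict["short"]+=(
--             short_range_def<=abs(resi2-resi1)<medm_range_def)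
--         con_num_dict["medm"]+=(
--             medm_range_def<=abs(resi2-resi1)<long_range_def)
--         con_num_dict["long"]+=(
--             long_range_def<=abs(resi2-resi1))
--     return con_num_dict
-- ===== SOURCE B (Python) =====
-- short_range_def=6 # short_range_def <= separation < medm_range_def
--
-- medm_range_def=12 # medm_range_def  <= separation < long_range_def
--
-- long_range_def=24 # long_range_def  <= separation. 25 in NeBcon/NN-BAYES
--
-- def _bisect_left(a, x):
--     '''index of the first element of sorted list a that is >= x'''
--     lo, hi = 0, len(a)
--     while lo < hi:
--         mid = (lo + hi) // 2
--         if a[mid] < x: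
--             lo = mid + 1
--         else:
--             hi = mid
--     return lo
--
-- def calc_contact_num(res_con_list, L):
--     ''' calculate the number of contacts at different range
--     (sort separations once, then binary-search the range boundaries) '''
--     seps = sorted(abs(resi2 - resi1) for resi1, resi2, dist in res_con_list)
--     i6 = _bisect_left(seps, short_range_def)
--     i12 = _bisect_left(seps, medm_range_def)
--     i24 = _bisect_left(seps, long_range_def)
--     return {"short": i12 - i6, "medm": i24 - i12,
--             "long": len(seps) - i24, "all": len(seps), "L": L}
-- ===== Notes on version B (the rewrite author's own statement) =====
-- stated objective: alternative
-- what changed: Instead of classifying each pair in a single scan with three comparisons per element, B sorts the residue separations once and obtains each range count as a difference of binary-searched (bisect_left) boundary indices for the thresholds 6, 12, 24.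
import Mathlib
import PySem

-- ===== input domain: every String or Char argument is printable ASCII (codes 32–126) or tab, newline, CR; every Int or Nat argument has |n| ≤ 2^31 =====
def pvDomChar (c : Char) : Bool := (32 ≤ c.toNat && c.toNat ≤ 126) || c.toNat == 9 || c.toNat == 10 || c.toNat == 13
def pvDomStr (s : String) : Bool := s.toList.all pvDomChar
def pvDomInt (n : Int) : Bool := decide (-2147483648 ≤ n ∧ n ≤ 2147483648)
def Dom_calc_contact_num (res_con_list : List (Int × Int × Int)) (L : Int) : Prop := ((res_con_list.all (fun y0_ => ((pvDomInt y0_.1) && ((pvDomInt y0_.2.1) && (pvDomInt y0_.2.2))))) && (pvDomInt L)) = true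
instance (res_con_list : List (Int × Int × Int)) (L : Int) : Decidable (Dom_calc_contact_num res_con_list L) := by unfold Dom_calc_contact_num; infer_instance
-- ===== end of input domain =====

-- B replaces the per-pair classify-while-scanning loop by sort-then-bisect range counting (alternative decomposition, not faster).


-- ===== PORT A =====
-- module constants
def short_range_def : Int := 6
def medm_range_def : Int := 12
def long_range_def : Int := 24

-- loop body of A's for-loop (the three '+=' updates on con_num_dict)
def stepA (d : PySem.Dict String Int) (t : Int × Int × Int) : PySem.Dict String Int :=
  let resi1 := t.1
  let resi2 := t.2.1
  let d := d.modify "short" 0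
    (· + (if short_range_def ≤ |resi2 - resi1| ∧ |resi2 - resi1| < medm_range_def then 1 else 0))
  let d := d.modify "medm" 0
    (· + (if medm_range_def ≤ |resi2 - resi1| ∧ |resi2 - resi1| < long_range_def then 1 else 0))
  let d := d.modify "long" 0
    (· + (if long_range_def ≤ |resi2 - resi1| then 1 else 0))
  d

def calc_contact_num (res_con_list : List (Int × Int × Int)) (L : Int) : List (String × Int) :=
  let con_num_dict : PySem.Dict String Int :=
    ⟨[("short", 0), ("medm", 0), ("long", 0), ("all", (res_con_list.length : Int)), ("L", L)]⟩
  let con_num_dict := res_con_list.foldl stepA con_num_dict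
  con_num_dict.items

-- ===== PORT B =====
-- _bisect_left in Source B is the standard bisect_left lo/hi loop, ported as PySem.List.bisectLeft (the same loop)
def calc_contact_num_alt (res_con_list : List (Int × Int × Int)) (L : Int) : List (String × Int) :=
  let seps := PySem.List.sorted (res_con_list.map (fun t => |t.2.1 - t.1|)) (fun x => x) false
  let i6 := PySem.List.bisectLeft seps short_range_def
  let i12 := PySem.List.bisectLeft seps medm_range_def
  let i24 := PySem.List.bisectLeft seps long_range_def
  [("short", (i12 : Int) - (i6 : Int)), ("medm", (i24 : Int) - (i12 : Int)),
   ("long", (seps.length : Int) - (i24 : Int)), ("all", (seps.length : Int)), ("L", L)]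

-- ===== PRECONDITION & SPEC =====
def Spec_calc_contact_num (res_con_list : List (Int × Int × Int)) (L : Int) (out : List (String × Int)) : Prop := out = calc_contact_num_alt res_con_list L
instance (res_con_list : List (Int × Int × Int)) (L : Int) (out : List (String × Int)) : Decidable (Spec_calc_contact_num res_con_list L out) := by unfold Spec_calc_contact_num; infer_instance

-- ===== CLAIM (what is proved, stated in full; the proofs are below) =====
def Claim_equal_calc_contact_num : Prop := ∀ (res_con_list : List (Int × Int × Int)) (L : Int), Dom_calc_contact_num res_con_list L → Spec_calc_contact_num res_con_list L (calc_contact_num res_con_list L)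

-- ===== LEMMAS AND PROOFS =====

-- A's fold over the five-key dict accumulates the three range counts
-- one step of A's loop on the literal five-key dict
lemma stepA_lit (t : Int × Int × Int) (s m g A L : Int) :
    stepA ⟨[("short", s), ("medm", m), ("long", g), ("all", A), ("L", L)]⟩ t
    = ⟨[("short", s + (if short_range_def ≤ |t.2.1 - t.1| ∧ |t.2.1 - t.1| < medm_range_def then 1 else 0)),
        ("medm", m + (if medm_range_def ≤ |t.2.1 - t.1| ∧ |t.2.1 - t.1| < long_range_def then 1 else 0)),
        ("long", g + (if long_range_def ≤ |t.2.1 - t.1| then 1 else 0)),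
        ("all", A), ("L", L)]⟩ := by
  simp [stepA, PySem.Dict.modify, PySem.Dict.insert, PySem.Dict.getD, PySem.Dict.get?,
    PySem.Dict.contains]

lemma foldA_eq (l : List (Int × Int × Int)) (s m g A L : Int) :
    l.foldl stepA (⟨[("short", s), ("medm", m), ("long", g), ("all", A), ("L", L)]⟩ : PySem.Dict String Int)
    = ⟨[("short", s + (l.countP (fun t => decide (short_range_def ≤ |t.2.1 - t.1| ∧ |t.2.1 - t.1| < medm_range_def)) : Int)),
        ("medm", m + (l.countP (fun t => decide (medm_range_def ≤ |t.2.1 - t.1| ∧ |t.2.1 - t.1| < long_range_def)) : Int)),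
        ("long", g + (l.countP (fun t => decide (long_range_def ≤ |t.2.1 - t.1|)) : Int)),
        ("all", A), ("L", L)]⟩ := by
  induction l generalizing s m g with
  | nil => simp
  | cons x xs ih =>
      rw [List.foldl_cons, stepA_lit, ih]
      simp only [List.countP_cons]
      simp only [decide_eq_true_eq]
      split_ifs
      all_goals push_cast
      all_goals simp
      all_goals try ring
      all_goals trivial

-- bisect_left on a sorted list is the number of elements below the target
lemma bisectLeft_eq_countP (seps : List Int) (x : Int)
    (hs : seps.Pairwise (· ≤ ·)) :
    PySem.List.bisectLeft seps x = seps.countP (fun v => decide (v < x)) := by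
  obtain ⟨hk, hlt, hge⟩ := PySem.List.bisectLeft_spec seps x hs
  set k := PySem.List.bisectLeft seps x with hkdef
  have htd : seps.countP (fun v => decide (v < x))
      = (seps.take k).countP (fun v => decide (v < x))
        + (seps.drop k).countP (fun v => decide (v < x)) := by
    rw [← List.countP_append, List.take_append_drop]
  have h1 : (seps.take k).countP (fun v => decide (v < x)) = k := by
    rw [List.countP_eq_length.mpr, List.length_take, Nat.min_eq_left hk]
    intro a ha
    obtain ⟨i, hi, hget⟩ := List.mem_iff_getElem.mp ha
    have hik : i < k := by have := hi; simp [List.length_take] at this; omega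
    have hil : i < seps.length := lt_of_lt_of_le hik hk
    have : seps[i] = a := by
      rw [← hget]; exact (List.getElem_take).symm
    simpa [this] using decide_eq_true (hlt i hil hik)
  have h2 : (seps.drop k).countP (fun v => decide (v < x)) = 0 := by
    rw [List.countP_eq_zero]
    intro a ha
    obtain ⟨i, hi, hget⟩ := List.mem_iff_getElem.mp ha
    have hil : k + i < seps.length := by
      have := hi; simp [List.length_drop] at this; omega
    have : seps[k + i] = a := by rw [← hget]; simp [List.getElem_drop]
    have hx := hge (k + i) hil (Nat.le_add_right k i)
    simp [this] at hx
    simp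
    omega
  omega

lemma countP_lt_split (l : List Int) (a b : Int) (hab : a ≤ b) :
    l.countP (fun v => decide (v < b))
      = l.countP (fun v => decide (v < a)) + l.countP (fun v => decide (a ≤ v ∧ v < b)) := by
  induction l with
  | nil => simp
  | cons x xs ih => simp only [List.countP_cons, ih]; split_ifs with h1 h2 h3 <;> simp_all <;> omega

lemma countP_ge_split (l : List Int) (a : Int) :
    l.length = l.countP (fun v => decide (v < a)) + l.countP (fun v => decide (a ≤ v)) := by
  induction l with
  | nil => simp
  | cons x xs ih => simp only [List.countP_cons, List.length_cons, ih]; split_ifs <;> simp_all <;> omega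

-- ===== VERDICT (by name: the statement is the Claim_ definition above) =====
theorem calc_contact_num_spec : Claim_equal_calc_contact_num := by
  intro l L _
  unfold Spec_calc_contact_num calc_contact_num calc_contact_num_alt
  simp only []
  rw [foldA_eq]
  have hs : (PySem.List.sorted (l.map (fun t => |t.2.1 - t.1|)) (fun x => x) false).Pairwise (· ≤ ·) := by
    simpa using PySem.List.sorted_pairwise (l.map (fun t => |t.2.1 - t.1|)) (fun x => x)
  set seps := PySem.List.sorted (l.map (fun t => |t.2.1 - t.1|)) (fun x => x) false with hseps
  have hperm : seps.Perm (l.map (fun t => |t.2.1 - t.1|)) := PySem.List.sorted_perm _ _ _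
  have hcount : ∀ p : Int → Bool, seps.countP p = l.countP (fun t => p (|t.2.1 - t.1|)) := by
    intro p; rw [hperm.countP_eq, List.countP_map]; rfl
  have hlen : seps.length = l.length := by
    rw [hperm.length_eq, List.length_map]
  have h6 := bisectLeft_eq_countP seps short_range_def hs
  have h12 := bisectLeft_eq_countP seps medm_range_def hs
  have h24 := bisectLeft_eq_countP seps long_range_def hs
  have hsplit1 := countP_lt_split seps short_range_def medm_range_def (by norm_num [short_range_def, medm_range_def])
  have hsplit2 := countP_lt_split seps medm_range_def long_range_def (by norm_num [medm_range_def, long_range_def])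
  have hsplit3 := countP_ge_split seps long_range_def
  have hmid1 : seps.countP (fun v => decide (short_range_def ≤ v ∧ v < medm_range_def))
      = l.countP (fun t => decide (short_range_def ≤ |t.2.1 - t.1| ∧ |t.2.1 - t.1| < medm_range_def)) :=
    hcount _
  have hmid2 : seps.countP (fun v => decide (medm_range_def ≤ v ∧ v < long_range_def))
      = l.countP (fun t => decide (medm_range_def ≤ |t.2.1 - t.1| ∧ |t.2.1 - t.1| < long_range_def)) :=
    hcount _
  have hmid3 : seps.countP (fun v => decide (long_range_def ≤ v))
      = l.countP (fun t => decide (long_range_def ≤ |t.2.1 - t.1|)) :=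
    hcount _
  simp only [List.cons.injEq, Prod.mk.injEq, true_and, and_true]
  refine ⟨?_, ?_, ?_, ?_⟩ <;> simp only [h6, h12, h24, hlen] <;> omega
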